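-- pv_equiv track=rewrite | github.com/dennisjooo/moodlist | backend/app/agents/recommender/mood_analyzer/analysis/mood_analysis_engine.py | _infer_regional_context
-- ===== SOURCE A (Python) =====
-- from typing import Any, Dict, List, Optional, Union
--
-- def _infer_regional_context(prompt_lower: str) -> tuple[List[str], List[str]]:
--     """Infer regional preferences from the mood prompt.
--
--     Args:
--         prompt_lower: Lowercase mood prompt
--
--     Returns:
--         Tuple of (preferred_regions, excluded_regions)
--     """
--     preferred = []
--     excluded = []
--
--     # French/European indicators
--     if any(term in prompt_lower for term in ["french", "france", "parisian"]):
--         preferred.extend(["French", "European", "Western"])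
--         excluded.extend(["Southeast Asian", "Indonesian", "Eastern European"])
--
--     # General European
--     elif any(
--         term in prompt_lower
--         for term in ["european", "euro", "nu-disco", "house", "disco"]
--     ):
--         preferred.extend(["European", "Western"])
--         excluded.extend(["Southeast Asian", "Indonesian"])
--
--     # K-pop / Asian
--     elif any(
--         term in prompt_lower
--         for term in [
--             "k-pop",
--             "kpop",
--             "korean",
--             "j-pop",
--             "jpop",
--             "japanese",
--             "anime",
--         ]
--     ):
--         preferred.append("Asian")
--         excluded.extend(["Southeast Asian", "Western"])
--
--     # Latin
--     elif any(
--         term in prompt_lower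
--         for term in ["latin", "reggaeton", "spanish", "salsa", "bachata"]
--     ):
--         preferred.append("Latin American")
--         excluded.extend(["Southeast Asian", "Asian"])
--
--     # Default to Western if no specific region detected
--     elif not preferred:
--         preferred.append("Western")
--         excluded.extend(["Southeast Asian", "Indonesian"])
--
--     return preferred, excluded
-- ===== SOURCE B (Python) =====
-- # Different algorithm: instead of an ordered if/elif chain with early exit, scan a flat
-- # keyword->priority map exhaustively and keep the MINIMUM matched priority; the minimum
-- # indexes an output table.  Correct because the original groups are disjoint branches in
-- # increasing priority order, so the first matching group is exactly the minimum-priority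
-- # matched keyword (default priority 4 when nothing matches).
-- _KEYWORD_PRIORITY = {
--     "french": 0, "france": 0, "parisian": 0,
--     "european": 1, "euro": 1, "nu-disco": 1, "house": 1, "disco": 1,
--     "k-pop": 2, "kpop": 2, "korean": 2, "j-pop": 2, "jpop": 2, "japanese": 2, "anime": 2,
--     "latin": 3, "reggaeton": 3, "spanish": 3, "salsa": 3, "bachata": 3,
-- }
-- _OUTPUTS = [
--     (["French", "European", "Western"], ["Southeast Asian", "Indonesian", "Eastern European"]),
--     (["European", "Western"], ["Southeast Asian", "Indonesian"]),
--     (["Asian"], ["Southeast Asian", "Western"]),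
--     (["Latin American"], ["Southeast Asian", "Asian"]),
--     (["Western"], ["Southeast Asian", "Indonesian"]),
-- ]
--
-- def _infer_regional_context(prompt_lower):
--     best = len(_OUTPUTS) - 1
--     for term, priority in _KEYWORD_PRIORITY.items():
--         if priority < best and term in prompt_lower:
--             best = priority
--     preferred, excluded = _OUTPUTS[best]
--     return list(preferred), list(excluded)
-- ===== Notes on version B (the rewrite author's own statement) =====
-- stated objective: alternative
-- what changed: Replaces the ordered if/elif chain (first-match with early exit) by an exhaustive scan of a flat keyword-to-priority map that keeps the minimum matched priority, which then indexes an output table; correct because branch order equals priority order.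
import Mathlib
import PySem

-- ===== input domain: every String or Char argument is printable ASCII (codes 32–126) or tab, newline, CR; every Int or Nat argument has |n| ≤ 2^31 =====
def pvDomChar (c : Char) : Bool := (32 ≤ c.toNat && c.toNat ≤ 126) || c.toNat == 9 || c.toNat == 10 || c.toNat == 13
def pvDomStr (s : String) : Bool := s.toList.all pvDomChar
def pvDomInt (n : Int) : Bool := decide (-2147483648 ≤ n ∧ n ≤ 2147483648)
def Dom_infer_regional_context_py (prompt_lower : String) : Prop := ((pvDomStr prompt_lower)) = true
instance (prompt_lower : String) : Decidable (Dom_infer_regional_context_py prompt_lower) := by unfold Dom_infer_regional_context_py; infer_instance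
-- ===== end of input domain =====

-- B replaces the ordered if/elif chain by a minimum-matched-priority scan of a flat keyword map (alternative algorithm, same cost).
-- ===== PORT A =====
def infer_regional_context_py (prompt_lower : String) : List String × List String :=
  let preferred : List String := []
  let excluded : List String := []
  if ["french", "france", "parisian"].any (fun term => PySem.Str.isIn term prompt_lower) then
    (preferred ++ ["French", "European", "Western"],
     excluded ++ ["Southeast Asian", "Indonesian", "Eastern European"])
  else if ["european", "euro", "nu-disco", "house", "disco"].any
      (fun term => PySem.Str.isIn term prompt_lower) then
    (preferred ++ ["European", "Western"], excluded ++ ["Southeast Asian", "Indonesian"])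
  else if ["k-pop", "kpop", "korean", "j-pop", "jpop", "japanese", "anime"].any
      (fun term => PySem.Str.isIn term prompt_lower) then
    (preferred ++ ["Asian"], excluded ++ ["Southeast Asian", "Western"])
  else if ["latin", "reggaeton", "spanish", "salsa", "bachata"].any
      (fun term => PySem.Str.isIn term prompt_lower) then
    (preferred ++ ["Latin American"], excluded ++ ["Southeast Asian", "Asian"])
  else if preferred = [] then
    (preferred ++ ["Western"], excluded ++ ["Southeast Asian", "Indonesian"])
  else (preferred, excluded)

-- ===== PORT B =====
def pvKeywordPriority : List (String × Nat) :=
  [("french", 0), ("france", 0), ("parisian", 0),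
   ("european", 1), ("euro", 1), ("nu-disco", 1), ("house", 1), ("disco", 1),
   ("k-pop", 2), ("kpop", 2), ("korean", 2), ("j-pop", 2), ("jpop", 2), ("japanese", 2), ("anime", 2),
   ("latin", 3), ("reggaeton", 3), ("spanish", 3), ("salsa", 3), ("bachata", 3)]

def pvOutputs : List (List String × List String) :=
  [(["French", "European", "Western"], ["Southeast Asian", "Indonesian", "Eastern European"]),
   (["European", "Western"], ["Southeast Asian", "Indonesian"]),
   (["Asian"], ["Southeast Asian", "Western"]),
   (["Latin American"], ["Southeast Asian", "Asian"]),
   (["Western"], ["Southeast Asian", "Indonesian"])]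

def pvStep (prompt_lower : String) (best : Nat) (tp : String × Nat) : Nat :=
  if tp.2 < best ∧ PySem.Str.isIn tp.1 prompt_lower then tp.2 else best

def infer_regional_context_py_alt (prompt_lower : String) : List String × List String :=
  let best := pvKeywordPriority.foldl (pvStep prompt_lower) (pvOutputs.length - 1)
  pvOutputs.getD best ([], [])

-- ===== PRECONDITION & SPEC =====
def Spec_infer_regional_context_py (prompt_lower : String) (out : List String × List String) : Prop := out = infer_regional_context_py_alt prompt_lower
instance (prompt_lower : String) (out : List String × List String) : Decidable (Spec_infer_regional_context_py prompt_lower out) := by unfold Spec_infer_regional_context_py; infer_instance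

-- ===== CLAIM (what is proved, stated in full; the proofs are below) =====
def Claim_equal_infer_regional_context_py : Prop := ∀ (prompt_lower : String), Dom_infer_regional_context_py prompt_lower → Spec_infer_regional_context_py prompt_lower (infer_regional_context_py prompt_lower)

-- ===== LEMMAS AND PROOFS =====

-- pvStep with the match test abstracted as q: folding over a uniform-priority group
-- computes `min b k` exactly when some keyword of the group matches.
theorem pv_foldl_min (q : String → Bool) (k : Nat) (l : List (String × Nat))
    (hl : ∀ tp ∈ l, tp.2 = k) (b : Nat) :
    l.foldl (fun best tp => if tp.2 < best ∧ q tp.1 then tp.2 else best) b =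
      if l.any (fun tp => q tp.1) then min b k else b := by
  induction l generalizing b with
  | nil => simp
  | cons t rest ih =>
    have ht : t.2 = k := hl t (by simp)
    have hrest : ∀ tp ∈ rest, tp.2 = k := fun tp h => hl tp (by simp [h])
    rw [List.foldl_cons, List.any_cons, ih hrest, ht]
    rcases Bool.dichotomy (q t.1) with h1 | h1 <;>
      rcases Bool.dichotomy (rest.any fun tp => q tp.1) with h3 | h3 <;>
        simp only [h1, h3, Bool.or_false, Bool.or_true,
          Bool.false_eq_true, and_true, and_false, if_false] <;>
        split_ifs <;> omega

-- ===== VERDICT (by name: the statement is the Claim_ definition above) =====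
theorem pv_step_abs (p : String) :
    pvStep p = fun best tp =>
      if tp.2 < best ∧ PySem.Str.isIn tp.1 p then tp.2 else best := rfl

theorem infer_regional_context_py_spec : Claim_equal_infer_regional_context_py := by
  intro p _
  unfold Spec_infer_regional_context_py
  simp only [infer_regional_context_py, infer_regional_context_py_alt]
  have hsplit : pvKeywordPriority =
      [("french", (0:Nat)), ("france", 0), ("parisian", 0)] ++
      [("european", 1), ("euro", 1), ("nu-disco", 1), ("house", 1), ("disco", 1)] ++
      [("k-pop", 2), ("kpop", 2), ("korean", 2), ("j-pop", 2), ("jpop", 2), ("japanese", 2), ("anime", 2)] ++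
      [("latin", 3), ("reggaeton", 3), ("spanish", 3), ("salsa", 3), ("bachata", 3)] := rfl
  rw [hsplit, pv_step_abs, List.foldl_append, List.foldl_append, List.foldl_append]
  rw [pv_foldl_min (fun s => PySem.Str.isIn s p) 3
        [("latin", 3), ("reggaeton", 3), ("spanish", 3), ("salsa", 3), ("bachata", 3)] (by decide),
      pv_foldl_min (fun s => PySem.Str.isIn s p) 2
        [("k-pop", 2), ("kpop", 2), ("korean", 2), ("j-pop", 2), ("jpop", 2), ("japanese", 2), ("anime", 2)] (by decide),
      pv_foldl_min (fun s => PySem.Str.isIn s p) 1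
        [("european", 1), ("euro", 1), ("nu-disco", 1), ("house", 1), ("disco", 1)] (by decide),
      pv_foldl_min (fun s => PySem.Str.isIn s p) 0
        [("french", 0), ("france", 0), ("parisian", 0)] (by decide)]
  simp only [List.any_cons, List.any_nil]
  rcases Bool.dichotomy (PySem.Str.isIn "french" p ||
      (PySem.Str.isIn "france" p || (PySem.Str.isIn "parisian" p || false))) with h0 | h0 <;>
  rcases Bool.dichotomy (PySem.Str.isIn "european" p || (PySem.Str.isIn "euro" p ||
      (PySem.Str.isIn "nu-disco" p || (PySem.Str.isIn "house" p ||
        (PySem.Str.isIn "disco" p || false))))) with h1 | h1 <;>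
  rcases Bool.dichotomy (PySem.Str.isIn "k-pop" p || (PySem.Str.isIn "kpop" p ||
      (PySem.Str.isIn "korean" p || (PySem.Str.isIn "j-pop" p || (PySem.Str.isIn "jpop" p ||
        (PySem.Str.isIn "japanese" p || (PySem.Str.isIn "anime" p || false))))))) with h2 | h2 <;>
  rcases Bool.dichotomy (PySem.Str.isIn "latin" p || (PySem.Str.isIn "reggaeton" p ||
      (PySem.Str.isIn "spanish" p || (PySem.Str.isIn "salsa" p ||
        (PySem.Str.isIn "bachata" p || false))))) with h3 | h3 <;>
  simp only [h0, h1, h2, h3] <;> decide
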